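-- pv_equiv track=rewrite | github.com/HeadHunter483/msu-ling | Syntax/Codes/python/morph.py | s_morph
-- ===== SOURCE A (Python) =====
-- def s_morph(string):
--     str5=""
--     mas=[]
--     mas2=[]
--     word = string.split()
--
--     for current_word in word:
--         mas.append(current_word.lower())
--
--     while(len(mas2)!=4):
--         mas2.append("-")
--
--     for s in mas:
--         if (s=='f' or s=='m' or s=='n'): #род
--             mas2[0]=s
--         if (s=='inan' or s=='anim'): #одуш
--             mas2[1]=s
--         if (s=='nom' or s=='gen' or s=='dat' or s=='acc' or s=='ins' or s=='loc'):
--             mas2[2]=s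
--         if (s=='sg' or s=='pl'): #число
--             mas2[3]=s
--
--     i=0
--     for i in range(len(mas2)):
--         str5=str5+' '+mas2[i]
--
--     return str5
--
-- i=0
-- ===== SOURCE B (Python) =====
-- CATS = [{'f', 'm', 'n'},
--         {'inan', 'anim'},
--         {'nom', 'gen', 'dat', 'acc', 'ins', 'loc'},
--         {'sg', 'pl'}]
--
-- def s_morph(string):
--     words = [w.lower() for w in string.split()]
--     return ''.join(' ' + next((w for w in reversed(words) if w in cat), '-')
--                    for cat in CATS)
-- ===== Notes on version B (the rewrite author's own statement) =====
-- stated objective: idiomatic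
-- what changed: Inverts the loop nesting: instead of one word-major pass mutating a 4-slot array, B selects, for each of the four category token-sets in turn, the last matching word of the reversed word list (default '-') and joins the tags with leading spaces.
import Mathlib
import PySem

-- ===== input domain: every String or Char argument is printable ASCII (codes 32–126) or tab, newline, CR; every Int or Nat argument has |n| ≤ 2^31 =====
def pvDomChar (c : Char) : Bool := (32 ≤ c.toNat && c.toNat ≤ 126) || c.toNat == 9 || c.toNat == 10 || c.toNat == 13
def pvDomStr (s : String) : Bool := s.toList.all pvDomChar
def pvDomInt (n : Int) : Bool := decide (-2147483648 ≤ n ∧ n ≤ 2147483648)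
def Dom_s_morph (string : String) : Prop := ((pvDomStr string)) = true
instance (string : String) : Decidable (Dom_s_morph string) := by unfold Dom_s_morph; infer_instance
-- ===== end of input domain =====

-- B inverts the loop nesting: category-major selection of the last matching word (idiomatic; no speed claim).

-- ===== PORT A =====
-- the 'while len(mas2) != 4: mas2.append("-")' loop, with fuel (5 suffices from [])
def pvFillDash : Nat → List String → List String
  | 0, m => m
  | n+1, m => if m.length ≠ 4 then pvFillDash n (m ++ ["-"]) else m

def pvStepA (m2 : List String) (s : String) : List String :=
  let m2 := if s == "f" || s == "m" || s == "n" then m2.set 0 s else m2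
  let m2 := if s == "inan" || s == "anim" then m2.set 1 s else m2
  let m2 := if s == "nom" || s == "gen" || s == "dat" || s == "acc" || s == "ins" || s == "loc" then m2.set 2 s else m2
  let m2 := if s == "sg" || s == "pl" then m2.set 3 s else m2
  m2

def s_morph (string : String) : String :=
  let word := PySem.Str.split₀ string
  let mas := word.foldl (fun acc w => acc ++ [PySem.Str.lower w]) []
  let mas2 := pvFillDash 5 []
  let mas2 := mas.foldl pvStepA mas2
  (PySem.List.pyRange 0 (mas2.length : Int) 1).foldl
    (fun str5 i => str5 ++ " " ++ ((PySem.List.pyGet? mas2 i).getD "")) ""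

-- ===== PORT B =====
def pvCATS : List (PySem.Set String) :=
  [PySem.Set.ofList ["f", "m", "n"],
   PySem.Set.ofList ["inan", "anim"],
   PySem.Set.ofList ["nom", "gen", "dat", "acc", "ins", "loc"],
   PySem.Set.ofList ["sg", "pl"]]

def s_morph_alt (string : String) : String :=
  let words := (PySem.Str.split₀ string).map PySem.Str.lower
  PySem.Str.join "" (pvCATS.map (fun cat =>
    " " ++ ((words.reverse.find? (fun w => PySem.Set.contains cat w)).getD "-")))

-- ===== PRECONDITION & SPEC =====
def Spec_s_morph (string : String) (out : String) : Prop := out = s_morph_alt string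
instance (string : String) (out : String) : Decidable (Spec_s_morph string out) := by unfold Spec_s_morph; infer_instance

-- ===== CLAIM (what is proved, stated in full; the proofs are below) =====
def Claim_equal_s_morph : Prop := ∀ (string : String), Dom_s_morph string → Spec_s_morph string (s_morph string)

-- ===== LEMMAS AND PROOFS =====

-- 'last matching word, else default' as a left-to-right accumulator
def pvLast (p : String → Bool) : List String → String → String
  | [], x => x
  | s :: t, x => pvLast p t (if p s then s else x)

lemma foldl_push (f : String → String) : ∀ (l acc : List String),
    l.foldl (fun a w => a ++ [f w]) acc = acc ++ l.map f := by
  intro l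
  induction l with
  | nil => simp
  | cons s t ih => intro acc; simp [ih]

lemma foldA_eq : ∀ (ms : List String) (g a c n : String),
    ms.foldl pvStepA [g, a, c, n] =
      [pvLast (fun s => s == "f" || s == "m" || s == "n") ms g,
       pvLast (fun s => s == "inan" || s == "anim") ms a,
       pvLast (fun s => s == "nom" || s == "gen" || s == "dat" || s == "acc" || s == "ins" || s == "loc") ms c,
       pvLast (fun s => s == "sg" || s == "pl") ms n] := by
  intro ms
  induction ms with
  | nil => intro g a c n; simp [pvLast]
  | cons s t ih =>
    intro g a c n
    have hstep : pvStepA [g, a, c, n] s =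
        [if s == "f" || s == "m" || s == "n" then s else g,
         if s == "inan" || s == "anim" then s else a,
         if s == "nom" || s == "gen" || s == "dat" || s == "acc" || s == "ins" || s == "loc" then s else c,
         if s == "sg" || s == "pl" then s else n] := by
      simp only [pvStepA]
      split_ifs <;> simp [List.set]
    simp only [List.foldl_cons, hstep, ih, pvLast]

lemma find?_rev_eq_pvLast (p : String → Bool) : ∀ (ms : List String) (d : String),
    (ms.reverse.find? p).getD d = pvLast p ms d := by
  intro ms
  induction ms with
  | nil => intro d; simp [pvLast]
  | cons s t ih =>
    intro d
    rw [List.reverse_cons, List.find?_append]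
    cases h : t.reverse.find? p with
    | some v =>
      have h2 := ih (if p s then s else d)
      rw [h] at h2
      simp only [pvLast, ← h2]
      simp
    | none =>
      have h2 := ih (if p s then s else d)
      rw [h, Option.getD_none] at h2
      simp only [pvLast, ← h2]
      cases hp : p s <;> simp [List.find?, hp]

lemma pvContains_eq (xs : List String) (w : String) :
    (PySem.Set.ofList xs).contains w = xs.contains w := by
  have h : ∀ y, y ∈ PySem.Set.ofList xs ↔ y ∈ xs := fun y => PySem.Set.mem_ofList xs y
  simp [h]

theorem s_morph_spec : Claim_equal_s_morph := by
  intro string _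
  unfold Spec_s_morph
  simp only [s_morph, s_morph_alt]
  rw [foldl_push]
  simp only [List.nil_append, pvCATS, List.map_cons, List.map_nil]
  rw [show pvFillDash 5 [] = ["-", "-", "-", "-"] from rfl, foldA_eq]
  have hpred : ∀ xs : List String, (fun w => (PySem.Set.ofList xs).contains w)
      = (fun w => xs.contains w) := fun xs => funext (pvContains_eq xs)
  simp only [hpred]
  have hc : ∀ (xs : List String) (p : String → Bool), (∀ w, xs.contains w = p w) →
      ∀ (l : List String) (d : String), (l.reverse.find? fun w => xs.contains w).getD d = pvLast p l d := by
    intro xs p h l d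
    rw [show (fun w => xs.contains w) = p from funext h]
    exact find?_rev_eq_pvLast p l d
  have hp0 : ∀ w : String, (["f", "m", "n"] : List String).contains w = (w == "f" || w == "m" || w == "n") := by
    intro w; simp [Bool.or_assoc, beq_eq_decide]
  have hp1 : ∀ w : String, (["inan", "anim"] : List String).contains w = (w == "inan" || w == "anim") := by
    intro w; simp [beq_eq_decide]
  have hp2 : ∀ w : String, (["nom", "gen", "dat", "acc", "ins", "loc"] : List String).contains w
      = (w == "nom" || w == "gen" || w == "dat" || w == "acc" || w == "ins" || w == "loc") := by
    intro w; simp [Bool.or_assoc, beq_eq_decide]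
  have hp3 : ∀ w : String, (["sg", "pl"] : List String).contains w = (w == "sg" || w == "pl") := by
    intro w; simp [beq_eq_decide]
  rw [hc _ _ hp0, hc _ _ hp1, hc _ _ hp2, hc _ _ hp3]
  generalize pvLast (fun s => s == "f" || s == "m" || s == "n") (List.map PySem.Str.lower (PySem.Str.split₀ string)) "-" = t0
  generalize pvLast (fun s => s == "inan" || s == "anim") (List.map PySem.Str.lower (PySem.Str.split₀ string)) "-" = t1
  generalize pvLast (fun s => s == "nom" || s == "gen" || s == "dat" || s == "acc" || s == "ins" || s == "loc") (List.map PySem.Str.lower (PySem.Str.split₀ string)) "-" = t2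
  generalize pvLast (fun s => s == "sg" || s == "pl") (List.map PySem.Str.lower (PySem.Str.split₀ string)) "-" = t3
  show List.foldl (fun str5 i => str5 ++ " " ++ (PySem.List.pyGet? [t0, t1, t2, t3] i).getD "") ""
      (PySem.List.pyRange 0 (([t0, t1, t2, t3] : List String).length : Int))
    = PySem.Str.join "" [" " ++ t0, " " ++ t1, " " ++ t2, " " ++ t3]
  have hr : PySem.List.pyRange 0 ((4 : Nat) : Int) = [0, 1, 2, 3] := by decide
  simp only [List.length_cons, List.length_nil, Nat.zero_add, hr]
  norm_num [List.foldl, PySem.List.pyGet?, PySem.List.pyIdx?, PySem.Str.join, PySem.Chars.join, List.intercalate]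
  apply String.ext
  simp [String.toList_append, List.append_assoc]
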